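-- pv_equiv track=rewrite | github.com/Denniswillie/bfs_dfs_comparison | bfs_dfs_comparison.py | bfs
-- ===== SOURCE A (Python) =====
-- from collections import deque
--
-- def bfs(graph, start_node, target_node):
-- 	queue = deque([[start_node]])
-- 	result = []
--
-- 	while len(queue) > 0:
-- 		curr_path = queue.popleft()
-- 		if len(curr_path) == 3:
-- 			result.append(curr_path[1])
-- 			continue
--
-- 		curr_node = curr_path[-1]
-- 		curr_node_followings = graph[curr_node]
-- 		for node in curr_node_followings:
-- 			if len(curr_path) == 2:
-- 				if node == target_node:
-- 					queue.append([curr_path[0], curr_path[1], node])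
-- 			else:
-- 				queue.append([curr_path[0], node])
-- 	return result
-- ===== SOURCE B (Python) =====
-- def bfs(graph, start_node, target_node):
--     # Collect the middle node of every 2-hop path start -> mid -> target,
--     # with multiplicity, directly via a nested comprehension (no queue, no path lists).
--     return [mid for mid in graph[start_node] for nbr in graph[mid] if nbr == target_node]
-- ===== Notes on version B (the rewrite author's own statement) =====
-- stated objective: simpler
-- what changed: Replaces the BFS queue of explicit path lists with a direct nested comprehension over graph[start_node] and graph[mid], appending mid once per neighbour equal to target_node.
import Mathlib
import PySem

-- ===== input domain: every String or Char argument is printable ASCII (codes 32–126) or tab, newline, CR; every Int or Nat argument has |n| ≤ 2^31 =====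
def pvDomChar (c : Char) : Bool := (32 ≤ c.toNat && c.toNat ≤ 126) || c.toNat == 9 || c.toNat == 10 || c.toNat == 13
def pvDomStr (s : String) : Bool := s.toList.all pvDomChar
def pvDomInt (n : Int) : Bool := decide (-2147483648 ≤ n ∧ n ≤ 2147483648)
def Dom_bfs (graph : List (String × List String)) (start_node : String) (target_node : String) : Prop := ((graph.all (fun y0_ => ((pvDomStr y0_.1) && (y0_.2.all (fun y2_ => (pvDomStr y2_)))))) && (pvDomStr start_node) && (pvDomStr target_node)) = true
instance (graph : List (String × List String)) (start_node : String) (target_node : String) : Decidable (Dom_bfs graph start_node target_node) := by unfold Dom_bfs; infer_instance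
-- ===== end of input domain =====

-- B replaces A's BFS deque of explicit path lists with a direct nested scan over
-- graph[start_node] and graph[mid]; same return value on every input where A returns.


-- ===== PORT A =====

-- Python dict lookup graph[k] on the association list (first match; none = KeyError).
def pvLookup (graph : List (String × List String)) (k : String) : Option (List String) :=
  (graph.find? (fun kv => kv.1 == k)).map (·.2)

-- termination measure: cost of one queued path (number of loop iterations it can still cause)
def pvCost (graph : List (String × List String)) (p : List String) : Nat :=
  if p.length = 3 then 1
  else match p.getLast? with
  | none => 1
  | some curr =>
    match pvLookup graph curr with
    | none => 1
    | some fol =>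
      if p.length = 2 then 1 + fol.length
      else 1 + (fol.map (fun n => 1 + ((pvLookup graph n).getD []).length)).sum

theorem pvCost_pair (graph : List (String × List String)) (x n : String) :
    pvCost graph [x, n] = 1 + ((pvLookup graph n).getD []).length := by
  cases h : pvLookup graph n <;> simp [pvCost, h]

-- the while-loop of A: state = (queue, result); each branch mirrors A's body.
def bfsLoop (graph : List (String × List String)) (target_node : String)
    (queue : List (List String)) (result : List String) : List String :=
  match queue with
  | [] => result
  | p :: rest =>
    if h3 : p.length = 3 then
      -- result.append(curr_path[1]); continue   (index 1 is in range: length = 3)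
      bfsLoop graph target_node rest (result ++ [(PySem.List.pyGet? p 1).getD ""])
    else
      match hcur : PySem.List.pyGet? p (-1) with
      | none => result            -- curr_path[-1] raises IndexError (unreachable: queue paths are nonempty)
      | some curr =>
        match hfol : pvLookup graph curr with
        | none => result          -- graph[curr_node] raises KeyError (excluded by Pre_bfs)
        | some followings =>
          if h2 : p.length = 2 then
            -- for node in followings: if node == target: queue.append([p0, p1, node])
            bfsLoop graph target_node
              (rest ++ (followings.filter (fun n => n == target_node)).map (fun n => p ++ [n])) result
          else
            -- for node in followings: queue.append([p0, node])   (p0 = p[0]; p is nonempty here)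
            bfsLoop graph target_node
              (rest ++ followings.map (fun n => [p.headD "", n])) result
  termination_by (queue.map (pvCost graph)).sum
  decreasing_by
  · have hc : pvCost graph p = 1 := by simp [pvCost, h3]
    simp only [List.map_cons, List.sum_cons, hc]; omega
  · have hl : p.getLast? = some curr := by rw [← PySem.List.pyGet?_neg_one]; exact hcur
    have hc : pvCost graph p = 1 + followings.length := by
      simp [pvCost, hl, hfol, h2]
    have h1 : ∀ n ∈ followings.filter (fun n => n == target_node),
        pvCost graph (p ++ [n]) = 1 := by
      intro n _; simp [pvCost, h2]
    have hle : (followings.filter (fun n => n == target_node)).length ≤ followings.length :=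
      List.length_filter_le _ _
    simp only [List.map_cons, List.sum_cons, List.map_append, List.sum_append, List.map_map,
      Function.comp_def]
    rw [List.map_congr_left h1]
    simp only [List.map_const', List.sum_replicate, smul_eq_mul, mul_one]
    omega
  · have hl : p.getLast? = some curr := by rw [← PySem.List.pyGet?_neg_one]; exact hcur
    have hc : pvCost graph p
        = 1 + (followings.map (fun n => 1 + ((pvLookup graph n).getD []).length)).sum := by
      simp [pvCost, h3, hl, hfol, h2]
    simp only [List.map_cons, List.sum_cons, List.map_append, List.sum_append, List.map_map,
      Function.comp_def]
    have h1 : (followings.map (fun n => pvCost graph [p.headD "", n])).sum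
        = (followings.map (fun n => 1 + ((pvLookup graph n).getD []).length)).sum := by
      apply congrArg; apply List.map_congr_left; intro n _; exact pvCost_pair graph _ n
    rw [h1]; omega

def bfs (graph : List (String × List String)) (start_node : String) (target_node : String) : List String :=
  bfsLoop graph target_node [[start_node]] []

-- ===== PORT B =====
def bfs_alt (graph : List (String × List String)) (start_node : String) (target_node : String) : List String :=
  match pvLookup graph start_node with
  | none => []                    -- graph[start_node] raises KeyError (excluded by Pre_bfs)
  | some mids =>
    mids.flatMap (fun mid =>
      match pvLookup graph mid with
      | none => []                -- graph[mid] raises KeyError (excluded by Pre_bfs)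
      | some nbrs => (nbrs.filter (fun nbr => nbr == target_node)).map (fun _ => mid))

-- ===== PRECONDITION & SPEC =====
-- Pre_bfs: exactly the inputs on which A returns (start_node is a key of graph and so is
-- every neighbour of start_node); elsewhere A raises KeyError.
def Pre_bfs (graph : List (String × List String)) (start_node : String) (target_node : String) : Prop :=
  (pvLookup graph start_node).isSome = true ∧
  ∀ m ∈ (pvLookup graph start_node).getD [], (pvLookup graph m).isSome = true
instance (graph : List (String × List String)) (start_node : String) (target_node : String) : Decidable (Pre_bfs graph start_node target_node) := by unfold Pre_bfs; infer_instance

def pvWitness_bfs : (List (String × List String)) × String × String :=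
  ([("a", ["b", "c"]), ("b", ["c", "a"]), ("c", ["c"])], "a", "c")

def Spec_bfs (graph : List (String × List String)) (start_node : String) (target_node : String) (out : List String) : Prop := out = bfs_alt graph start_node target_node
instance (graph : List (String × List String)) (start_node : String) (target_node : String) (out : List String) : Decidable (Spec_bfs graph start_node target_node out) := by unfold Spec_bfs; infer_instance

-- ===== CLAIM (what is proved, stated in full; the proofs are below) =====
def Claim_equal_bfs : Prop := ∀ (graph : List (String × List String)) (start_node : String) (target_node : String), Dom_bfs graph start_node target_node → Pre_bfs graph start_node target_node → Spec_bfs graph start_node target_node (bfs graph start_node target_node)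

-- ===== LEMMAS AND PROOFS =====

-- phase 3: a queue holding only completed 3-paths appends their middle nodes, in order
theorem bfsLoop_threes (graph : List (String × List String)) (t : String)
    (q3 : List (String × String × String)) (res : List String) :
    bfsLoop graph t (q3.map (fun x => [x.1, x.2.1, x.2.2])) res
      = res ++ q3.map (fun x => x.2.1) := by
  induction q3 generalizing res with
  | nil => simp [bfsLoop]
  | cons x q ih =>
    rw [List.map_cons, bfsLoop]
    simp only [List.length_cons, List.length_nil]
    rw [dif_pos (by simp)]
    rw [ih]
    simp [PySem.List.pyGet?, PySem.List.pyIdx?]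

-- phase 2 then 3: queue = 2-paths (with resolvable endpoints) followed by 3-paths
theorem bfsLoop_twos (graph : List (String × List String)) (t : String)
    (q2 : List (String × String)) (q3 : List (String × String × String)) (res : List String)
    (h : ∀ x ∈ q2, (pvLookup graph x.2).isSome = true) :
    bfsLoop graph t (q2.map (fun x => [x.1, x.2]) ++ q3.map (fun x => [x.1, x.2.1, x.2.2])) res
      = res ++ q3.map (fun x => x.2.1)
          ++ q2.flatMap (fun x =>
              (((pvLookup graph x.2).getD []).filter (fun n => n == t)).map (fun _ => x.2)) := by
  induction q2 generalizing q3 res with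
  | nil => simp [bfsLoop_threes]
  | cons x q ih =>
    obtain ⟨fol, hfol⟩ := Option.isSome_iff_exists.mp (h x (by simp))
    rw [List.map_cons, List.cons_append, bfsLoop]
    simp only [List.length_cons, List.length_nil]
    rw [dif_neg (by omega)]
    have hget : PySem.List.pyGet? [x.1, x.2] (-1) = some x.2 := by
      rw [PySem.List.pyGet?_neg_one]; simp
    split
    · simp_all
    · rename_i curr hcur
      rw [hget] at hcur
      injection hcur with hcur
      subst hcur
      split
      · simp_all
      · rename_i fol' hfol'
        rw [hfol] at hfol'
        injection hfol' with hfol'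
        subst hfol'
        rw [dif_pos (by simp)]
        have hq : q.map (fun x => [x.1, x.2]) ++ q3.map (fun x => [x.1, x.2.1, x.2.2])
            ++ (fol.filter (fun n => n == t)).map (fun n => [x.1, x.2] ++ [n])
            = q.map (fun x => [x.1, x.2])
              ++ ((q3 ++ (fol.filter (fun n => n == t)).map (fun n => (x.1, x.2, n))).map
                  (fun x => [x.1, x.2.1, x.2.2])) := by
          simp [List.map_map, Function.comp_def]
        rw [hq, ih _ _ (fun y hy => h y (by simp [hy]))]
        simp [List.map_map, Function.comp_def, hfol]

-- unfolding one step from the initial singleton path [start_node]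
theorem bfs_eq_twos (graph : List (String × List String)) (s t : String)
    (mids : List String) (hs : pvLookup graph s = some mids) :
    bfs graph s t = bfsLoop graph t ((mids.map (fun m => (s, m))).map (fun x => [x.1, x.2])) [] := by
  rw [bfs, bfsLoop]
  simp only [List.length_cons, List.length_nil]
  rw [dif_neg (by omega)]
  have hget : PySem.List.pyGet? [s] (-1) = some s := by
    rw [PySem.List.pyGet?_neg_one]; simp
  split
  · simp_all
  · rename_i curr hcur
    rw [hget] at hcur
    injection hcur with hcur
    subst hcur
    split
    · simp_all
    · rename_i fol' hfol'
      rw [hs] at hfol'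
      injection hfol' with hfol'
      subst hfol'
      rw [dif_neg (by omega)]
      simp [List.map_map, Function.comp_def]

-- ===== VERDICT (by name: the statement is the Claim_ definition above) =====
theorem bfs_spec : Claim_equal_bfs := by
  intro graph s t _ hpre
  obtain ⟨hs, hmem⟩ := hpre
  obtain ⟨mids, hmids⟩ := Option.isSome_iff_exists.mp hs
  have hmem' : ∀ m ∈ mids, (pvLookup graph m).isSome = true := by
    intro m hm; exact hmem m (by simp [hmids, hm])
  unfold Spec_bfs
  rw [bfs_eq_twos graph s t mids hmids]
  have h2 := bfsLoop_twos graph t (mids.map (fun m => (s, m))) [] []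
      (by intro x hx; simp only [List.mem_map] at hx; obtain ⟨m, hm, rfl⟩ := hx; exact hmem' m hm)
  simp only [List.map_nil, List.append_nil, List.nil_append] at h2
  rw [h2]
  unfold bfs_alt
  rw [hmids]
  rw [List.flatMap_map]
  clear h2 hmids hs hmem
  induction mids with
  | nil => simp
  | cons m ms ih =>
    obtain ⟨nbrs, hn⟩ := Option.isSome_iff_exists.mp (hmem' m (by simp))
    simp only [List.flatMap_cons, hn]
    rw [ih (fun y hy => hmem' y (by simp [hy]))]
    simp
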